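-- pv_equiv track=rewrite | github.com/Vansalot/mooc-programming-23 | part04-38_grade_statistics/src/grade_statistics.py | check_grade_distribution
-- ===== SOURCE A (Python) =====
-- def check_grade_distribution(exam_points_list, exercises_points_list):
--     # loop through points and assign grade
--     # return a list of grades (yes, dict would be better...)
--     grade_5 = 0
--     grade_4 = 0
--     grade_3 = 0
--     grade_2 = 0
--     grade_1 = 0
--     grade_0 = 0
--
--     for index in range(0, len(exam_points_list)):
--         if exam_points_list[index] < 10:
--             grade_0 += 1
--             continue
--         elif exam_points_list[index] + exercises_points_list[index] < 15:
--             grade_0 += 1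
--             continue
--         elif exam_points_list[index] + exercises_points_list[index] < 18:
--             grade_1 += 1
--             continue
--         elif exam_points_list[index] + exercises_points_list[index] < 21:
--             grade_2 += 1
--             continue
--         elif exam_points_list[index] + exercises_points_list[index] < 24:
--             grade_3 += 1
--             continue
--         elif exam_points_list[index] + exercises_points_list[index] < 28:
--             grade_4 += 1
--             continue
--         elif exam_points_list[index] + exercises_points_list[index] < 31:
--             grade_5 += 1
--             continue
--
--     gradelist = [grade_5, grade_4, grade_3, grade_2, grade_1, grade_0]
--     return gradelist
-- ===== SOURCE B (Python) =====
-- THRESHOLDS = [15, 18, 21, 24, 28, 31]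
--
-- def check_grade_distribution(exam_points_list, exercises_points_list):
--     # counts[g] = number of students with grade g; bucket via threshold table
--     counts = [0, 0, 0, 0, 0, 0]
--     for index in range(len(exam_points_list)):
--         if exam_points_list[index] < 10:
--             counts[0] += 1
--             continue
--         total = exam_points_list[index] + exercises_points_list[index]
--         g = sum(1 for t in THRESHOLDS if t <= total)
--         if g <= 5:  # total >= 31 is dropped, as in the original
--             counts[g] += 1
--     return counts[::-1]
-- ===== Notes on version B (the rewrite author's own statement) =====
-- stated objective: idiomatic
-- what changed: Replaces the six scalar counters and the seven-way if/elif chain by a counts list indexed by the grade computed from a threshold table (bucket index = number of thresholds <= total), reversed once at the end.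
import Mathlib
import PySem

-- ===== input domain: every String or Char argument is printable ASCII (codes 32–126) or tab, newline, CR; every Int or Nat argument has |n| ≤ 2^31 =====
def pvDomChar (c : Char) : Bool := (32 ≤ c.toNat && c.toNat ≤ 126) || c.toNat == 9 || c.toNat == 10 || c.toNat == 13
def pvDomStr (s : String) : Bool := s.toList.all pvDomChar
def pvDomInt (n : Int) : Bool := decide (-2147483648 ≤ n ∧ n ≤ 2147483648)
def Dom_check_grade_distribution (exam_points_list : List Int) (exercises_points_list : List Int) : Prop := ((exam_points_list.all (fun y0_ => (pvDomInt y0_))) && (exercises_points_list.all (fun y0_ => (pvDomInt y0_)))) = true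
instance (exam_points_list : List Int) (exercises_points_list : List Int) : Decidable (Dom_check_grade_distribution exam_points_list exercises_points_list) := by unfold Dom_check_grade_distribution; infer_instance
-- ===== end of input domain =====

-- B replaces the six counters and the if/elif chain by a grade-indexed counts list and a
-- threshold table (idiomatic, same O(n) cost).

-- ===== PORT A =====
-- one iteration of A's for-loop; state = (grade_5, grade_4, grade_3, grade_2, grade_1, grade_0)
def pvStepA (exam ex : List Int) (st : Int × Int × Int × Int × Int × Int) (i : Int) :
    Int × Int × Int × Int × Int × Int :=
  match PySem.List.pyGet? exam i with
  | none => st  -- unreachable: i comes from range(0, len(exam))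
  | some e =>
    let (g5, g4, g3, g2, g1, g0) := st
    if e < 10 then (g5, g4, g3, g2, g1, g0 + 1)
    else
      match PySem.List.pyGet? ex i with
      | none => st  -- Python raises IndexError here; excluded by Pre_
      | some x =>
        if e + x < 15 then (g5, g4, g3, g2, g1, g0 + 1)
        else if e + x < 18 then (g5, g4, g3, g2, g1 + 1, g0)
        else if e + x < 21 then (g5, g4, g3, g2 + 1, g1, g0)
        else if e + x < 24 then (g5, g4, g3 + 1, g2, g1, g0)
        else if e + x < 28 then (g5, g4 + 1, g3, g2, g1, g0)
        else if e + x < 31 then (g5 + 1, g4, g3, g2, g1, g0)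
        else st

def check_grade_distribution (exam_points_list : List Int) (exercises_points_list : List Int) : List Int :=
  let s := (PySem.List.pyRange 0 (exam_points_list.length : Int) 1).foldl
            (pvStepA exam_points_list exercises_points_list) (0, 0, 0, 0, 0, 0)
  [s.1, s.2.1, s.2.2.1, s.2.2.2.1, s.2.2.2.2.1, s.2.2.2.2.2]

-- ===== PORT B =====
def pvThresholds : List Int := [15, 18, 21, 24, 28, 31]

-- one iteration of B's for-loop; state = counts list indexed by grade 0..5
def pvStepB (exam ex : List Int) (counts : List Int) (i : Int) : List Int :=
  match PySem.List.pyGet? exam i with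
  | none => counts  -- unreachable: i comes from range(len(exam))
  | some e =>
    if e < 10 then counts.set 0 (counts.getD 0 0 + 1)
    else
      match PySem.List.pyGet? ex i with
      | none => counts  -- Python raises IndexError here; excluded by Pre_
      | some x =>
        let total := e + x
        let g := pvThresholds.countP (fun t => decide (t ≤ total))
        if g ≤ 5 then counts.set g (counts.getD g 0 + 1) else counts

def check_grade_distribution_alt (exam_points_list : List Int) (exercises_points_list : List Int) : List Int :=
  ((PySem.List.pyRange 0 (exam_points_list.length : Int) 1).foldl
    (pvStepB exam_points_list exercises_points_list) [0, 0, 0, 0, 0, 0]).reverse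

-- ===== PRECONDITION & SPEC =====
-- Pre_ excludes exactly the inputs where A raises IndexError: some index with exam points ≥ 10
-- has no matching entry in the exercises list (B raises there too).
def Pre_check_grade_distribution (exam_points_list : List Int) (exercises_points_list : List Int) : Prop :=
  ∀ i : Nat, i < exam_points_list.length → 10 ≤ exam_points_list.getD i 0 →
    i < exercises_points_list.length
instance (exam_points_list : List Int) (exercises_points_list : List Int) : Decidable (Pre_check_grade_distribution exam_points_list exercises_points_list) := by unfold Pre_check_grade_distribution; infer_instance

def pvWitness_check_grade_distribution : List Int × List Int := ([12, 5, 30], [8, 20, 5])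

def Spec_check_grade_distribution (exam_points_list : List Int) (exercises_points_list : List Int) (out : List Int) : Prop := out = check_grade_distribution_alt exam_points_list exercises_points_list
instance (exam_points_list : List Int) (exercises_points_list : List Int) (out : List Int) : Decidable (Spec_check_grade_distribution exam_points_list exercises_points_list out) := by unfold Spec_check_grade_distribution; infer_instance

-- ===== CLAIM (what is proved, stated in full; the proofs are below) =====
def Claim_equal_check_grade_distribution : Prop := ∀ (exam_points_list : List Int) (exercises_points_list : List Int), Dom_check_grade_distribution exam_points_list exercises_points_list → Pre_check_grade_distribution exam_points_list exercises_points_list → Spec_check_grade_distribution exam_points_list exercises_points_list (check_grade_distribution exam_points_list exercises_points_list)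

-- ===== LEMMAS AND PROOFS =====

-- one step of B equals one step of A, with the tuple state written back-to-front as a list
theorem pvStep_eq (exam ex : List Int) (i g5 g4 g3 g2 g1 g0 : Int) :
    pvStepB exam ex [g0, g1, g2, g3, g4, g5] i =
      (fun s : Int × Int × Int × Int × Int × Int =>
        [s.2.2.2.2.2, s.2.2.2.2.1, s.2.2.2.1, s.2.2.1, s.2.1, s.1])
        (pvStepA exam ex (g5, g4, g3, g2, g1, g0) i) := by
  unfold pvStepA pvStepB
  cases PySem.List.pyGet? exam i with
  | none => rfl
  | some e =>
    simp only
    by_cases h10 : e < 10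
    · simp [h10, List.set]
    · simp only [h10, if_false]
      cases PySem.List.pyGet? ex i with
      | none => rfl
      | some x =>
        by_cases h15 : e + x < 15
        · have c : pvThresholds.countP (fun t => decide (t ≤ e + x)) = 0 := by
            simp [pvThresholds, show ¬ (15:Int) ≤ e + x from by omega, show ¬ (18:Int) ≤ e + x from by omega, show ¬ (21:Int) ≤ e + x from by omega, show ¬ (24:Int) ≤ e + x from by omega, show ¬ (28:Int) ≤ e + x from by omega, show ¬ (31:Int) ≤ e + x from by omega]
          simp [h15, c]
        by_cases h18 : e + x < 18
        · have c : pvThresholds.countP (fun t => decide (t ≤ e + x)) = 1 := by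
            simp [pvThresholds, show (15:Int) ≤ e + x from by omega, show ¬ (18:Int) ≤ e + x from by omega, show ¬ (21:Int) ≤ e + x from by omega, show ¬ (24:Int) ≤ e + x from by omega, show ¬ (28:Int) ≤ e + x from by omega, show ¬ (31:Int) ≤ e + x from by omega]
          simp [h15, h18, c]
        by_cases h21 : e + x < 21
        · have c : pvThresholds.countP (fun t => decide (t ≤ e + x)) = 2 := by
            simp [pvThresholds, show (15:Int) ≤ e + x from by omega, show (18:Int) ≤ e + x from by omega, show ¬ (21:Int) ≤ e + x from by omega, show ¬ (24:Int) ≤ e + x from by omega, show ¬ (28:Int) ≤ e + x from by omega, show ¬ (31:Int) ≤ e + x from by omega]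
          simp [h15, h18, h21, c]
        by_cases h24 : e + x < 24
        · have c : pvThresholds.countP (fun t => decide (t ≤ e + x)) = 3 := by
            simp [pvThresholds, show (15:Int) ≤ e + x from by omega, show (18:Int) ≤ e + x from by omega, show (21:Int) ≤ e + x from by omega, show ¬ (24:Int) ≤ e + x from by omega, show ¬ (28:Int) ≤ e + x from by omega, show ¬ (31:Int) ≤ e + x from by omega]
          simp [h15, h18, h21, h24, c]
        by_cases h28 : e + x < 28
        · have c : pvThresholds.countP (fun t => decide (t ≤ e + x)) = 4 := by
            simp [pvThresholds, show (15:Int) ≤ e + x from by omega, show (18:Int) ≤ e + x from by omega, show (21:Int) ≤ e + x from by omega, show (24:Int) ≤ e + x from by omega, show ¬ (28:Int) ≤ e + x from by omega, show ¬ (31:Int) ≤ e + x from by omega]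
          simp [h15, h18, h21, h24, h28, c]
        by_cases h31 : e + x < 31
        · have c : pvThresholds.countP (fun t => decide (t ≤ e + x)) = 5 := by
            simp [pvThresholds, show (15:Int) ≤ e + x from by omega, show (18:Int) ≤ e + x from by omega, show (21:Int) ≤ e + x from by omega, show (24:Int) ≤ e + x from by omega, show (28:Int) ≤ e + x from by omega, show ¬ (31:Int) ≤ e + x from by omega]
          simp [h15, h18, h21, h24, h28, h31, c]
        · have c : pvThresholds.countP (fun t => decide (t ≤ e + x)) = 6 := by
            simp [pvThresholds, show (15:Int) ≤ e + x from by omega, show (18:Int) ≤ e + x from by omega, show (21:Int) ≤ e + x from by omega, show (24:Int) ≤ e + x from by omega, show (28:Int) ≤ e + x from by omega, show (31:Int) ≤ e + x from by omega]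
          simp [h15, h18, h21, h24, h28, h31, c]

theorem pvFold_eq (exam ex : List Int) (l : List Int) :
    ∀ g5 g4 g3 g2 g1 g0 : Int,
      l.foldl (pvStepB exam ex) [g0, g1, g2, g3, g4, g5] =
        (fun s : Int × Int × Int × Int × Int × Int =>
          [s.2.2.2.2.2, s.2.2.2.2.1, s.2.2.2.1, s.2.2.1, s.2.1, s.1])
          (l.foldl (pvStepA exam ex) (g5, g4, g3, g2, g1, g0)) := by
  induction l with
  | nil => intro g5 g4 g3 g2 g1 g0; rfl
  | cons i l ih =>
    intro g5 g4 g3 g2 g1 g0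
    simp only [List.foldl_cons, pvStep_eq]
    rcases h : pvStepA exam ex (g5, g4, g3, g2, g1, g0) i with ⟨a5, a4, a3, a2, a1, a0⟩
    exact ih a5 a4 a3 a2 a1 a0

-- ===== VERDICT (by name: the statement is the Claim_ definition above) =====
theorem check_grade_distribution_spec : Claim_equal_check_grade_distribution := by
  intro exam ex _ _
  unfold Spec_check_grade_distribution check_grade_distribution check_grade_distribution_alt
  rw [pvFold_eq exam ex _ 0 0 0 0 0 0]
  rcases (PySem.List.pyRange 0 (exam.length : Int) 1).foldl (pvStepA exam ex)
      (0, 0, 0, 0, 0, 0) with ⟨a5, a4, a3, a2, a1, a0⟩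
  simp
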